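-- pv_equiv track=rewrite | github.com/buxton45/PyAn | Utilities/Utilities.py | remove_tagged_from_list
-- ===== SOURCE A (Python) =====
-- def StringFind_CaseInsensitive(aStrA, aStrB):
--     tStrA = aStrA.strip().casefold()
--     tStrB = aStrB.strip().casefold()
--     if(len(tStrA) > len(tStrB)):
--         return tStrB in tStrA
--     else:
--         return tStrA in tStrB
--
-- def remove_tagged_from_list(lst, tags_to_ignore):
--     # Only return elements where none of the tags_to_ignore are found
--     # Case insensitive!
--     # 20210914:
--     #  Added functionality where if a tag within tags_to_ignore ends with '_EXACTMATCH'
--     #  then only elements exactly matching that tag will be removed (instead of the normal case where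
--     #  an element is removed if it contains the tag.
--     #
--     #  This new functionality was added when working with AT Tray Phantom 11, where I did not want to keep
--     #  any of the 'Freq_x' columns or 'MTF_1' (as MTF_1=1 trivially for all).
--     #  For this example,
--     #  lst = ['Freq_1', 'MTF_1', 'Freq_2', 'MTF_2', 'Freq_3', 'MTF_3', 'Freq_4', 'MTF_4', 'Freq_5', 'MTF_5', 'Freq_6', 'MTF_6',
--     #         'Freq_7', 'MTF_7', 'Freq_8', 'MTF_8', 'Freq_9', 'MTF_9', 'Freq_10', 'MTF_10', 'Freq_11', 'MTF_11']
--     #  Using the old method with tags_to_ignore = ['MTF_1', 'Freq_'], all 'Freq_x' and 'MTF_1' would be dropped, but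
--     #  'MTF_10' and 'MTF_11' would be dropped as well!
--     #  Thus, for the desired effect with the new functionality, the input should be:
--     #  tags_to_ignore = ['MTF_1_EXACTMATCH', 'Freq_']
--     assert(isinstance(lst, list) or isinstance(lst, tuple))
--     assert(isinstance(tags_to_ignore, list) or isinstance(tags_to_ignore, tuple))
--     exact_matches = [x for x in tags_to_ignore if x.endswith('_EXACTMATCH')]
--     reg_tags_to_ignore = [x for x in tags_to_ignore if not x.endswith('_EXACTMATCH')]
--     assert(len(tags_to_ignore)==len(exact_matches)+len(reg_tags_to_ignore))
--
--     # First, remove any exact matches specified by '_EXACTMATCH'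
--     if len(exact_matches)>0:
--         exact_matches = [x[:x.find('_EXACTMATCH')] for x in exact_matches] #strip off '_EXACTMATCH'
--         sub_list = [x for x in lst if all(x!=tag for tag in exact_matches)]
--     else:
--         sub_list = lst
--
--     # Now, run remove_tagged_from_list as originall written
--     sub_list = [x for x in sub_list if all(not StringFind_CaseInsensitive(x, tag) for tag in reg_tags_to_ignore)]
--     return sub_list
-- ===== SOURCE B (Python) =====
-- def remove_tagged_from_list(lst, tags_to_ignore):
--     # Single pass over lst; each tag is classified inline (exact-match vs substring)
--     assert(isinstance(lst, list) or isinstance(lst, tuple))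
--     assert(isinstance(tags_to_ignore, list) or isinstance(tags_to_ignore, tuple))
--     out = []
--     for x in lst:
--         keep = True
--         for tag in tags_to_ignore:
--             if tag.endswith('_EXACTMATCH'):
--                 if x == tag[:tag.find('_EXACTMATCH')]:
--                     keep = False
--                     break
--             else:
--                 a = x.strip().casefold()
--                 b = tag.strip().casefold()
--                 if (b in a) if len(a) > len(b) else (a in b):
--                     keep = False
--                     break
--         if keep:
--             out.append(x)
--     return out
-- ===== Notes on version B (the rewrite author's own statement) =====
-- stated objective: simpler
-- what changed: Replaces the upfront partition of tags and the two sequential filter comprehensions by one loop over lst that classifies each tag inline (exact-match vs case-insensitive substring) and keeps an element only if no tag triggers.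
import Mathlib
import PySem

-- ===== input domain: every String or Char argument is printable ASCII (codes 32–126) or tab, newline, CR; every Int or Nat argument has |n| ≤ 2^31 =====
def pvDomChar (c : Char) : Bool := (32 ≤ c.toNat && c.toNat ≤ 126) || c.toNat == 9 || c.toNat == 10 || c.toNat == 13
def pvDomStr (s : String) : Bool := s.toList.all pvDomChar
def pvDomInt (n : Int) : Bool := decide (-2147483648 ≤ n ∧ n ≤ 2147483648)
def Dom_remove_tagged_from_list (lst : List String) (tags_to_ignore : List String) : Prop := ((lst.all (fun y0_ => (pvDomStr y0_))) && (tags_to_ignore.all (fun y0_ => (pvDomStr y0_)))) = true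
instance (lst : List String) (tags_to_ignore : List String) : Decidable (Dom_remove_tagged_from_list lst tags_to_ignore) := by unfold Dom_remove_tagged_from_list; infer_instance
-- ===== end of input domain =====

-- B replaces A's tag partition + two sequential filter passes by one loop over lst
-- with inline tag classification (objective: simpler decomposition, same cost).
-- casefold is ported as PySem.Str.lower: exact on the ASCII domain these claims cover.

-- ===== PORT A =====
def pvStringFind_CaseInsensitive (aStrA aStrB : String) : Bool :=
  let tStrA := PySem.Str.lower (PySem.Str.strip aStrA)
  let tStrB := PySem.Str.lower (PySem.Str.strip aStrB)
  if PySem.Str.len tStrA > PySem.Str.len tStrB then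
    PySem.Str.isIn tStrB tStrA
  else
    PySem.Str.isIn tStrA tStrB

def remove_tagged_from_list (lst : List String) (tags_to_ignore : List String) : List String :=
  let exact_matches := tags_to_ignore.filter (fun x => PySem.Str.endswith x "_EXACTMATCH")
  let reg_tags_to_ignore := tags_to_ignore.filter (fun x => !PySem.Str.endswith x "_EXACTMATCH")
  let sub_list :=
    if exact_matches.length > 0 then
      let exact_matches' := exact_matches.map
        (fun x => PySem.Str.slice x none (some (PySem.Str.find x "_EXACTMATCH")))
      lst.filter (fun x => exact_matches'.all (fun tag => x != tag))
    else lst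
  sub_list.filter (fun x => reg_tags_to_ignore.all (fun tag => !pvStringFind_CaseInsensitive x tag))

-- ===== PORT B =====
def pvMatchesTag (x tag : String) : Bool :=
  if PySem.Str.endswith tag "_EXACTMATCH" then
    x == PySem.Str.slice tag none (some (PySem.Str.find tag "_EXACTMATCH"))
  else
    let a := PySem.Str.lower (PySem.Str.strip x)
    let b := PySem.Str.lower (PySem.Str.strip tag)
    if PySem.Str.len a > PySem.Str.len b then PySem.Str.isIn b a else PySem.Str.isIn a b

def remove_tagged_from_list_alt (lst : List String) (tags_to_ignore : List String) : List String :=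
  lst.foldl
    (fun out x => if tags_to_ignore.any (fun tag => pvMatchesTag x tag) then out else out ++ [x])
    []

-- ===== PRECONDITION & SPEC =====
def Spec_remove_tagged_from_list (lst : List String) (tags_to_ignore : List String) (out : List String) : Prop := out = remove_tagged_from_list_alt lst tags_to_ignore
instance (lst : List String) (tags_to_ignore : List String) (out : List String) : Decidable (Spec_remove_tagged_from_list lst tags_to_ignore out) := by unfold Spec_remove_tagged_from_list; infer_instance

-- ===== CLAIM (what is proved, stated in full; the proofs are below) =====
def Claim_equal_remove_tagged_from_list : Prop := ∀ (lst : List String) (tags_to_ignore : List String), Dom_remove_tagged_from_list lst tags_to_ignore → Spec_remove_tagged_from_list lst tags_to_ignore (remove_tagged_from_list lst tags_to_ignore)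

-- ===== LEMMAS AND PROOFS =====

-- per-element: A's two conjoined tag tests equal the negation of B's single any-scan
lemma pvMatchesTag_of_exact (x tag : String) (h : PySem.Str.endswith tag "_EXACTMATCH" = true) :
    pvMatchesTag x tag = (x == PySem.Str.slice tag none (some (PySem.Str.find tag "_EXACTMATCH"))) := by
  unfold pvMatchesTag; rw [if_pos h]

lemma pvMatchesTag_of_not_exact (x tag : String) (h : PySem.Str.endswith tag "_EXACTMATCH" = false) :
    pvMatchesTag x tag = pvStringFind_CaseInsensitive x tag := by
  unfold pvMatchesTag pvStringFind_CaseInsensitive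
  rw [if_neg (by rw [h]; exact Bool.false_ne_true)]

lemma pv_bne_eq_not_beq (x y : String) : (x != y) = !(x == y) := rfl

lemma pv_bool_exact (e g A R : Bool) (h : (A && R) = !g) :
    (((!e) && A) && R) = !(e || g) := by
  cases e <;> cases g <;> cases A <;> cases R <;> simp_all

lemma pv_bool_reg (s g A R : Bool) (h : (A && R) = !g) : (A && ((!s) && R)) = !(s || g) := by
  cases s <;> cases g <;> cases A <;> cases R <;> simp_all

lemma pv_keep_eq (x : String) (tags : List String) :
    (((tags.filter (fun t => PySem.Str.endswith t "_EXACTMATCH")).map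
        (fun t => PySem.Str.slice t none (some (PySem.Str.find t "_EXACTMATCH")))).all
          (fun tag => x != tag)
      && (tags.filter (fun t => !PySem.Str.endswith t "_EXACTMATCH")).all
          (fun tag => !pvStringFind_CaseInsensitive x tag))
    = !(tags.any (fun tag => pvMatchesTag x tag)) := by
  induction tags with
  | nil => rfl
  | cons t ts ih =>
    cases h : PySem.Str.endswith t "_EXACTMATCH" with
    | true =>
      rw [List.any_cons, pvMatchesTag_of_exact x t h,
        List.filter_cons_of_pos (p := fun t => PySem.Str.endswith t "_EXACTMATCH") h,
        List.filter_cons_of_neg (p := fun t => !PySem.Str.endswith t "_EXACTMATCH")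
          (by simp only [h]; exact (by decide)),
        List.map_cons, List.all_cons, pv_bne_eq_not_beq]
      exact pv_bool_exact _ _ _ _ ih
    | false =>
      rw [List.any_cons, pvMatchesTag_of_not_exact x t h,
        List.filter_cons_of_neg (p := fun t => PySem.Str.endswith t "_EXACTMATCH")
          (by simp only [h]; exact (by decide)),
        List.filter_cons_of_pos (p := fun t => !PySem.Str.endswith t "_EXACTMATCH")
          (by simp only [h]; exact (by decide)),
        List.all_cons]
      exact pv_bool_reg (pvStringFind_CaseInsensitive x t) _ _ _ ih

-- ===== VERDICT (by name: the statement is the Claim_ definition above) =====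
theorem remove_tagged_from_list_spec : Claim_equal_remove_tagged_from_list := by
  intro lst tags _
  unfold Spec_remove_tagged_from_list remove_tagged_from_list remove_tagged_from_list_alt
  -- B's accumulator loop is a filter
  have hB : lst.foldl
      (fun out x => if tags.any (fun tag => pvMatchesTag x tag) then out else out ++ [x]) []
      = lst.filter (fun x => !(tags.any (fun tag => pvMatchesTag x tag))) := by
    have := PySem.List.foldl_append_if_eq_filter
      (fun x => !(tags.any (fun tag => pvMatchesTag x tag))) lst ([] : List String)
    rw [PySem.List.foldl_congr_mem (g :=
      (fun out x => if (!(tags.any (fun tag => pvMatchesTag x tag))) = true then out ++ [x] else out))]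
    · simpa using this
    · intro acc x _
      cases tags.any (fun tag => pvMatchesTag x tag) <;> simp
  rw [hB]
  by_cases hlen : (tags.filter (fun x => PySem.Str.endswith x "_EXACTMATCH")).length > 0
  · simp only [hlen, if_true, List.filter_filter]
    refine List.filter_congr ?_
    intro x _
    rw [Bool.and_comm]
    exact pv_keep_eq x tags
  · have hnil : tags.filter (fun x => PySem.Str.endswith x "_EXACTMATCH") = [] := by
      cases hc : tags.filter (fun x => PySem.Str.endswith x "_EXACTMATCH") with
      | nil => rfl
      | cons a l => rw [hc] at hlen; simp at hlen
    simp only [hlen, if_false]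
    refine List.filter_congr ?_
    intro x _
    have := pv_keep_eq x tags
    rw [hnil] at this
    simpa using this
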